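-- pv_equiv track=rewrite | github.com/YadongM/Aurobay_task | version3/utilsv1.py | getTwoCategoryIndex
-- ===== SOURCE A (Python) =====
-- def getCategoryIndex(categories: list) -> dict:
--     """Get the list index in different category
--     Args:
--         categories (list): The categories list to find index
--     Returns:
--         dict: A dictory of result
--               key: Different categories,
--               value: The index of this category.
--     """
--     # Get the name of all categories
--     diffCategory = list(set(categories))
--     categoryIndex = dict()
--     for cat in diffCategory:
--         categoryIndex[cat] = list()
--
--     # Get the index of different category
--     for idx, cat in enumerate(categories):
--         categoryIndex[cat].append(idx)
--
--     return categoryIndex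
--
-- def getTwoCategoryIndex(cats1, cats2) -> dict:
--     """Get index of category 2 under category 1.
--     Args:
--         cats1 (list): The categories list to find index
--         cats2 (list): The sub categories list to find index
--     Returns:
--         dict: A dictory of result
--               key: Different categories,
--               value: A dictory of result
--                     key: Different subcategories,
--                     value: The index of this subcategory.
--     """
--     catsIndex = dict()
--     tmp_index_1 = getCategoryIndex(cats1)
--     for cat1 in tmp_index_1:
--         catsIndex[cat1] = dict()
--         tmp_Value_1 = [cats2[i] for i in tmp_index_1[cat1]]
--         tmp_index_2 = getCategoryIndex(tmp_Value_1)
--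
--         for cat2 in tmp_index_2:
--             tmp = [tmp_index_1[cat1][i] for i in tmp_index_2[cat2]]
--             catsIndex[cat1][cat2] = tmp
--
--     return catsIndex
-- ===== SOURCE B (Python) =====
-- def getTwoCategoryIndex(cats1, cats2) -> dict:
--     """Single pass: build the nested dict directly with setdefault."""
--     result = {}
--     for i in range(len(cats1)):
--         c1 = cats1[i]
--         c2 = cats2[i]
--         result.setdefault(c1, {}).setdefault(c2, []).append(i)
--     return result
-- ===== Notes on version B (the rewrite author's own statement) =====
-- stated objective: simpler
-- what changed: Replaced the two-level grouping (group cats1 via a set+enumerate helper, slice cats2 per group, re-group the slice, remap positions back to indices) with one index loop that builds the nested dict directly via setdefault(c1,{}).setdefault(c2,[]).append(i); one traversal, no intermediate lists.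
import Mathlib
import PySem

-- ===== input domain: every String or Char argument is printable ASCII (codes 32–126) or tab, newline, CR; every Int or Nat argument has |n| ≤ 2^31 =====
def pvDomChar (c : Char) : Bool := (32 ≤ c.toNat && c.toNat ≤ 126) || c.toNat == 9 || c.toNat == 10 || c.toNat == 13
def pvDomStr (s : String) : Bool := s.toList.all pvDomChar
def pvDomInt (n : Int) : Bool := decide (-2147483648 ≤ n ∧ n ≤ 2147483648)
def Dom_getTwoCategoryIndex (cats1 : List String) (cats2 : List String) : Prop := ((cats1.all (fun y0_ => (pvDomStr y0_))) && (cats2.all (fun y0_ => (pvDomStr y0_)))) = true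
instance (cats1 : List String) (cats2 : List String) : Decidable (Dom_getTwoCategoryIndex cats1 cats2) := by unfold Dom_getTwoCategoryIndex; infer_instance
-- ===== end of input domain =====

-- B builds the nested dict in a single index loop with setdefault instead of A's two-level
-- set+enumerate grouping with slicing and index remapping; equivalence of the RETURN value.

-- ===== PORT A =====
-- helper getCategoryIndex: set of categories, seed each key with [], then append indices
def getCategoryIndexA (categories : List String) : PySem.Dict String (List Int) :=
  let diffCategory : PySem.Set String := PySem.Set.ofList categories
  let categoryIndex := diffCategory.foldl (fun d cat => d.insert cat []) PySem.Dict.empty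
  (PySem.List.enumerate categories 0).foldl
    (fun d p => d.modify p.2 [] (fun l => l ++ [p.1])) categoryIndex

def getTwoCategoryIndex (cats1 : List String) (cats2 : List String) : List (String × List (String × List Int)) :=
  let tmpIndex1 := getCategoryIndexA cats1
  let catsIndex := tmpIndex1.keys.foldl (fun acc cat1 =>
    let tmpValue1 := (tmpIndex1.getD cat1 []).map (fun i => PySem.List.pyGetD cats2 i "")
    let tmpIndex2 := getCategoryIndexA tmpValue1
    let inner := tmpIndex2.keys.foldl (fun acc2 cat2 =>
      acc2.insert cat2 ((tmpIndex2.getD cat2 []).map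
        (fun j => PySem.List.pyGetD (tmpIndex1.getD cat1 []) j 0)))
      PySem.Dict.empty
    acc.insert cat1 inner) PySem.Dict.empty
  catsIndex.items.map (fun p => (p.1, p.2.items))

-- ===== PORT B =====
def getTwoCategoryIndex_alt (cats1 : List String) (cats2 : List String) : List (String × List (String × List Int)) :=
  let result := (PySem.List.pyRange 0 (cats1.length : Int) 1).foldl
    (fun acc i =>
      let c1 := PySem.List.pyGetD cats1 i ""
      let c2 := PySem.List.pyGetD cats2 i ""
      acc.modify c1 PySem.Dict.empty (fun inner => inner.modify c2 [] (fun l => l ++ [i])))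
    PySem.Dict.empty
  result.items.map (fun p => (p.1, p.2.items))

-- ===== PRECONDITION & SPEC =====
-- A (and B) raise IndexError reading cats2[i] when cats2 is shorter than cats1; exactly those inputs are excluded.
def Pre_getTwoCategoryIndex (cats1 : List String) (cats2 : List String) : Prop :=
  cats1.length ≤ cats2.length
instance (cats1 : List String) (cats2 : List String) : Decidable (Pre_getTwoCategoryIndex cats1 cats2) := by
  unfold Pre_getTwoCategoryIndex; infer_instance
def pvWitness_getTwoCategoryIndex : List String × List String :=
  (["a", "b", "a"], ["x", "y", "x"])

def Spec_getTwoCategoryIndex (cats1 : List String) (cats2 : List String) (out : List (String × List (String × List Int))) : Prop := out = getTwoCategoryIndex_alt cats1 cats2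
instance (cats1 : List String) (cats2 : List String) (out : List (String × List (String × List Int))) : Decidable (Spec_getTwoCategoryIndex cats1 cats2 out) := by unfold Spec_getTwoCategoryIndex; infer_instance

-- ===== CLAIM (what is proved, stated in full; the proofs are below) =====
def Claim_equal_getTwoCategoryIndex : Prop := ∀ (cats1 : List String) (cats2 : List String), Dom_getTwoCategoryIndex cats1 cats2 → Pre_getTwoCategoryIndex cats1 cats2 → Spec_getTwoCategoryIndex cats1 cats2 (getTwoCategoryIndex cats1 cats2)

-- ===== LEMMAS AND PROOFS =====

-- abbreviations used only by the proofs
def pvIdxOf (cats1 : List String) (c1 : String) : List Int :=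
  (PySem.List.pyRange 0 (cats1.length : Int) 1).filter
    (fun j => PySem.List.pyGetD cats1 j "" == c1)

-- the common canonical form both ports reduce to
def pvCanon (cats1 : List String) (cats2 : List String) : List (String × List (String × List Int)) :=
  (PySem.Set.ofList cats1).map (fun c1 =>
    (c1, (PySem.Set.ofList ((pvIdxOf cats1 c1).map (fun i => PySem.List.pyGetD cats2 i ""))).map
      (fun c2 => (c2, (pvIdxOf cats1 c1).filter (fun i => PySem.List.pyGetD cats2 i "" == c2)))))

theorem pvSet_update_of_subset {s l : List String} (h : ∀ x ∈ l, x ∈ s) :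
    PySem.Set.update s l = s := by
  induction l generalizing s with
  | nil => rfl
  | cons x xs ih =>
      have hx : PySem.Set.contains s x = true := by
        simp [PySem.Set.contains]
        exact h x (by simp)
      show PySem.Set.update (PySem.Set.add s x) xs = s
      rw [PySem.Set.add, if_pos hx]
      exact ih (fun y hy => h y (by simp [hy]))

theorem pvSeed_getD (s : List String) (d : PySem.Dict String (List Int)) (c : String)
    (h : d.getD c [] = []) :
    (s.foldl (fun d cat => d.insert cat ([] : List Int)) d).getD c [] = [] := by
  induction s generalizing d with
  | nil => exact h
  | cons x xs ih =>
      refine ih _ ?_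
      rw [PySem.Dict.getD_insert]
      split <;> simp [h]

theorem pvSeed_keys (s : List String) :
    ((PySem.Set.ofList s).foldl (fun d cat => d.insert cat ([] : List Int))
      PySem.Dict.empty).keys = PySem.Set.ofList s := by
  rw [PySem.Dict.keys_foldl_insert (f := fun _ _ => [])]
  rw [PySem.Dict.keys_empty]
  show PySem.Set.update [] (PySem.Set.ofList s) = _
  rw [PySem.Set.update, ← PySem.Set.ofList_eq_foldl, PySem.Set.ofList_ofList]

theorem pvGciA_keys (cs : List String) :
    (getCategoryIndexA cs).keys = PySem.Set.ofList cs := by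
  unfold getCategoryIndexA
  rw [PySem.Dict.keys_foldl_modify_key (PySem.List.enumerate cs 0) (fun p => p.2) []
        (fun _ p v => v ++ [p.1])]
  rw [pvSeed_keys, PySem.List.map_snd_enumerate]
  exact pvSet_update_of_subset (fun x hx => (PySem.Set.mem_ofList cs x).2 hx)

theorem pvGciA_getD (cs : List String) (c : String) :
    (getCategoryIndexA cs).getD c [] = pvIdxOf cs c := by
  unfold getCategoryIndexA
  have hswap :
      (PySem.List.enumerate cs 0).foldl
        (fun d p => d.modify p.2 [] (fun l => l ++ [p.1]))
        ((PySem.Set.ofList cs).foldl (fun d cat => d.insert cat ([] : List Int)) PySem.Dict.empty)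
      = ((PySem.List.enumerate cs 0).map Prod.swap).foldl
        (fun d p => d.modify p.1 [] (fun l => l ++ [p.2]))
        ((PySem.Set.ofList cs).foldl (fun d cat => d.insert cat ([] : List Int)) PySem.Dict.empty) := by
    rw [List.foldl_map]
    rfl
  rw [hswap, PySem.Dict.getD_foldl_modify_append,
      pvSeed_getD _ _ _ (by rw [PySem.Dict.getD_empty])]
  have henum : PySem.List.enumerate cs 0 = PySem.List.enumerate cs := rfl
  rw [henum, PySem.List.enumerate_eq_map_pyRange cs ""]
  rw [List.filter_map, List.map_map]
  simp only [pvIdxOf, PySem.List.len, Function.comp_def]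
  rw [List.filter_map, List.map_map]
  simp [Function.comp_def]

theorem pvFoldl_modify_getD {β : Type} (l : List Int) (k : Int → String) (d0 : β)
    (f : Int → β → β) (acc : PySem.Dict String β) (c : String) :
    (l.foldl (fun acc i => acc.modify (k i) d0 (f i)) acc).getD c d0
      = (l.filter (fun i => k i == c)).foldl (fun v i => f i v) (acc.getD c d0) := by
  induction l generalizing acc with
  | nil => rfl
  | cons x xs ih =>
      rw [List.foldl_cons, List.filter_cons, ih]
      by_cases hx : k x = c
      · simp [hx]
      · have : (k x == c) = false := by simpa using hx
        simp [this, PySem.Dict.getD_modify, Ne.symm hx]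

-- inner grouping fold (shared shape): getD after the modify-append loop
theorem pvInner_getD (l : List Int) (g : Int → String) (c2 : String) :
    ((l.foldl (fun inner i => inner.modify (g i) [] (fun t => t ++ [i]))
        (PySem.Dict.empty : PySem.Dict String (List Int))).getD c2 [])
      = l.filter (fun i => g i == c2) := by
  have hswap :
      l.foldl (fun inner i => inner.modify (g i) [] (fun t => t ++ [i])) PySem.Dict.empty
      = (l.map (fun i => (g i, i))).foldl
          (fun d p => d.modify p.1 [] (fun t => t ++ [p.2])) PySem.Dict.empty := by
    rw [List.foldl_map]
  rw [hswap, PySem.Dict.getD_foldl_modify_append, PySem.Dict.getD_empty]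
  rw [List.filter_map, List.map_map]
  simp [Function.comp_def]

theorem pvInner_keys (l : List Int) (g : Int → String) :
    ((l.foldl (fun inner i => inner.modify (g i) [] (fun t => t ++ [i]))
        (PySem.Dict.empty : PySem.Dict String (List Int))).keys)
      = PySem.Set.ofList (l.map g) := by
  rw [PySem.Dict.keys_foldl_modify_key l g [] (fun _ i t => t ++ [i]), PySem.Dict.keys_empty]
  rw [PySem.Set.update, ← PySem.Set.ofList_eq_foldl]

theorem pvGetD_map_index (l : List Int) (f : Int → String) (c : String) :
    ((PySem.List.pyRange 0 ((l.map f).length : Int) 1).filter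
        (fun j => PySem.List.pyGetD (l.map f) j "" == c)).map
      (fun j => PySem.List.pyGetD l j 0)
    = l.filter (fun i => f i == c) := by
  rw [List.length_map]
  have hfc : ∀ j ∈ PySem.List.pyRange 0 (l.length : Int) 1,
      (PySem.List.pyGetD (l.map f) j "" == c) = (f (PySem.List.pyGetD l j 0) == c) := by
    intro j hj
    obtain ⟨h0, h1⟩ := PySem.List.mem_pyRange_one.1 hj
    rw [PySem.List.pyGetD_eq_getElem _ _ h0 (by simpa using h1),
        PySem.List.pyGetD_eq_getElem _ _ h0 h1, List.getElem_map]
  rw [List.filter_congr hfc]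
  conv_rhs => rw [← PySem.List.map_pyGetD_pyRange_zero' l 0]
  rw [List.filter_map]
  simp [Function.comp_def]

theorem pvA_eq_canon (cats1 cats2 : List String) :
    getTwoCategoryIndex cats1 cats2 = pvCanon cats1 cats2 := by
  simp only [getTwoCategoryIndex]
  rw [PySem.Dict.items_foldl_insert_fresh ((getCategoryIndexA cats1).keys) (fun a => a)
        _ PySem.Dict.empty
        (fun a _ => PySem.Dict.contains_empty a)
        (by simp only [List.map_id_fun', id, pvGciA_keys]; exact PySem.Set.nodup_ofList cats1)]
  rw [pvGciA_keys]
  have hemp : (PySem.Dict.empty : PySem.Dict String (PySem.Dict String (List Int))).items = [] := rfl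
  rw [hemp, List.nil_append, List.map_map, pvCanon]
  apply List.map_congr_left
  intro c1 _
  simp only [Function.comp_apply]
  rw [PySem.Dict.items_foldl_insert_fresh
        ((getCategoryIndexA (((getCategoryIndexA cats1).getD c1 []).map
            (fun i => PySem.List.pyGetD cats2 i ""))).keys) (fun a => a)
        _ PySem.Dict.empty
        (fun a _ => PySem.Dict.contains_empty a)
        (by simp only [List.map_id_fun', id, pvGciA_keys]; exact PySem.Set.nodup_ofList _)]
  have hemp2 : (PySem.Dict.empty : PySem.Dict String (List Int)).items = [] := rfl
  rw [hemp2, List.nil_append, pvGciA_keys]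
  rw [pvGciA_getD cats1 c1]
  refine congrArg (Prod.mk c1) ?_
  apply List.map_congr_left
  intro c2 _
  rw [pvGciA_getD]
  simp only [pvIdxOf]
  rw [pvGetD_map_index]

theorem pvB_eq_canon (cats1 cats2 : List String) :
    getTwoCategoryIndex_alt cats1 cats2 = pvCanon cats1 cats2 := by
  simp only [getTwoCategoryIndex_alt]
  have hkeys :
      ((PySem.List.pyRange 0 (cats1.length : Int) 1).foldl
        (fun acc i => acc.modify (PySem.List.pyGetD cats1 i "") PySem.Dict.empty
          (fun inner => inner.modify (PySem.List.pyGetD cats2 i "") [] (fun l => l ++ [i])))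
        PySem.Dict.empty).keys = PySem.Set.ofList cats1 := by
    rw [PySem.Dict.keys_foldl_modify_key (PySem.List.pyRange 0 (cats1.length : Int) 1)
          (fun i => PySem.List.pyGetD cats1 i "") PySem.Dict.empty
          (fun _ i inner => inner.modify (PySem.List.pyGetD cats2 i "") [] (fun l => l ++ [i]))]
    rw [PySem.Dict.keys_empty]
    show PySem.Set.update [] _ = _
    rw [PySem.Set.update, ← PySem.Set.ofList_eq_foldl,
        PySem.List.map_pyGetD_pyRange_zero' cats1 ""]
  rw [PySem.Dict.items_eq_map_keys _ (by rw [hkeys]; exact PySem.Set.nodup_ofList cats1)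
        PySem.Dict.empty, hkeys, List.map_map, pvCanon]
  apply List.map_congr_left
  intro c1 _
  simp only [Function.comp]
  rw [pvFoldl_modify_getD (PySem.List.pyRange 0 (cats1.length : Int) 1)
        (fun i => PySem.List.pyGetD cats1 i "") PySem.Dict.empty
        (fun i inner => inner.modify (PySem.List.pyGetD cats2 i "") [] (fun l => l ++ [i]))
        PySem.Dict.empty c1]
  rw [PySem.Dict.getD_empty]
  have hfold :
      ((PySem.List.pyRange 0 (cats1.length : Int) 1).filter
          (fun i => PySem.List.pyGetD cats1 i "" == c1)).foldl
        (fun v i => v.modify (PySem.List.pyGetD cats2 i "") [] (fun l => l ++ [i]))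
        (PySem.Dict.empty : PySem.Dict String (List Int))
      = (pvIdxOf cats1 c1).foldl
        (fun inner i => inner.modify (PySem.List.pyGetD cats2 i "") [] (fun l => l ++ [i]))
        PySem.Dict.empty := rfl
  rw [hfold]
  rw [PySem.Dict.items_eq_map_keys _
        (by rw [pvInner_keys (pvIdxOf cats1 c1) (fun i => PySem.List.pyGetD cats2 i "")]
            exact PySem.Set.nodup_ofList _) []]
  rw [pvInner_keys (pvIdxOf cats1 c1) (fun i => PySem.List.pyGetD cats2 i "")]
  refine congrArg (Prod.mk c1) ?_
  apply List.map_congr_left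
  intro c2 _
  rw [pvInner_getD (pvIdxOf cats1 c1) (fun i => PySem.List.pyGetD cats2 i "") c2]

-- ===== VERDICT (by name: the statement is the Claim_ definition above) =====
theorem getTwoCategoryIndex_spec : Claim_equal_getTwoCategoryIndex := by
  intro cats1 cats2 _ _
  unfold Spec_getTwoCategoryIndex
  rw [pvA_eq_canon, pvB_eq_canon]
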